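-- pv_equiv track=rewrite | github.com/kayrugold/andyai | subsystems/creative/art_engine.py | scene_svg_from_concepts
-- ===== SOURCE A (Python) =====
-- def svg_wrap(content: str, width: int = 512, height: int = 512, bg: str = "black") -> str:
--     return f"""<svg xmlns="http://www.w3.org/2000/svg" width="{width}" height="{height}" viewBox="0 0 {width} {height}">
-- <rect width="100%" height="100%" fill="{bg}"/>
-- {content}
-- </svg>
-- """
--
-- def primitive_moon():
--     return '<circle cx="400" cy="100" r="48" fill="#f8f3c9" opacity="0.95" />'
--
-- def primitive_sun():
--     return '<circle cx="400" cy="100" r="52" fill="#ffd54a" opacity="0.95" />'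
--
-- def primitive_stars():
--     parts = []
--     pts = [(60,70), (120,40), (220,90), (310,50), (470,60), (520,120), (150,130)]
--     for x, y in pts:
--         parts.append(f'<circle cx="{x}" cy="{y}" r="3" fill="white" />')
--     return "\n".join(parts)
--
-- def primitive_ground():
--     return '<line x1="0" y1="400" x2="512" y2="400" stroke="#445566" stroke-width="3" />'
--
-- def primitive_mountain():
--     return '\n'.join([
--         '<polygon points="40,400 160,210 280,400" fill="#2f3d4f" />',
--         '<polygon points="180,400 320,180 460,400" fill="#394b60" />',
--     ])
--
-- def primitive_tree(x=120, y=400):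
--     trunk = f'<rect x="{x}" y="{y-70}" width="14" height="70" fill="#6b4f35" />'
--     canopy = f'<circle cx="{x+7}" cy="{y-88}" r="28" fill="#2e8b57" />'
--     return trunk + "\n" + canopy
--
-- def primitive_river():
--     return '<path d="M 20 430 C 120 420, 180 450, 300 430 S 450 390, 512 420" stroke="#5dade2" stroke-width="6" fill="none" opacity="0.85" />'
--
-- def primitive_wolf():
--     return '\n'.join([
--         '<polygon points="180,360 220,300 260,320 280,290 300,310 312,350 280,372 230,376" fill="#1e1e1e" />',
--         '<polygon points="255,300 268,278 278,302" fill="#1e1e1e" />',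
--         '<line x1="310" y1="345" x2="340" y2="320" stroke="#1e1e1e" stroke-width="6" />',
--     ])
--
-- def scene_svg_from_concepts(concepts):
--     concepts = [str(c).strip().lower() for c in concepts if str(c).strip()]
--     bg = "#0b1020" if ("night" in concepts or "moon" in concepts or "star" in concepts) else "#dff1ff"
--     parts = []
--
--     if "sun" in concepts:
--         parts.append(primitive_sun())
--     if "moon" in concepts:
--         parts.append(primitive_moon())
--     if "star" in concepts or "night" in concepts or "moon" in concepts:
--         parts.append(primitive_stars())
--     if "mountain" in concepts:
--         parts.append(primitive_mountain())
--     if "river" in concepts: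
--         parts.append(primitive_river())
--     if "ground" in concepts or "tree" in concepts or "wolf" in concepts or "mountain" in concepts:
--         parts.append(primitive_ground())
--     if "tree" in concepts:
--         parts.append(primitive_tree(110, 400))
--         parts.append(primitive_tree(370, 400))
--     if "wolf" in concepts:
--         parts.append(primitive_wolf())
--
--     if not parts:
--         parts.append('<text x="40" y="80" fill="white" font-size="22">No known scene concepts.</text>')
--
--     return svg_wrap("\n".join(parts), 512, 512, bg=bg)
-- ===== SOURCE B (Python) =====
-- # B: one pass over the raw concepts ORs per-keyword bits into an integer mask
-- # (no normalized list is ever built), then each layer is emitted from the mask's bits.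
-- _BIT = {'sun': 1, 'moon': 2, 'star': 4, 'night': 8, 'mountain': 16,
--         'river': 32, 'ground': 64, 'tree': 128, 'wolf': 256}
-- _SKY = 14      # moon | star | night
-- _LAYERS = [
--     (1, ['<circle cx="400" cy="100" r="52" fill="#ffd54a" opacity="0.95" />']),
--     (2, ['<circle cx="400" cy="100" r="48" fill="#f8f3c9" opacity="0.95" />']),
--     (14, ['<circle cx="60" cy="70" r="3" fill="white" />\n'
--           '<circle cx="120" cy="40" r="3" fill="white" />\n'
--           '<circle cx="220" cy="90" r="3" fill="white" />\n'
--           '<circle cx="310" cy="50" r="3" fill="white" />\n'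
--           '<circle cx="470" cy="60" r="3" fill="white" />\n'
--           '<circle cx="520" cy="120" r="3" fill="white" />\n'
--           '<circle cx="150" cy="130" r="3" fill="white" />']),
--     (16, ['<polygon points="40,400 160,210 280,400" fill="#2f3d4f" />\n'
--           '<polygon points="180,400 320,180 460,400" fill="#394b60" />']),
--     (32, ['<path d="M 20 430 C 120 420, 180 450, 300 430 S 450 390, 512 420" stroke="#5dade2" stroke-width="6" fill="none" opacity="0.85" />']),
--     (464, ['<line x1="0" y1="400" x2="512" y2="400" stroke="#445566" stroke-width="3" />']),
--     (128, ['<rect x="110" y="330" width="14" height="70" fill="#6b4f35" />\n'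
--            '<circle cx="117" cy="312" r="28" fill="#2e8b57" />',
--            '<rect x="370" y="330" width="14" height="70" fill="#6b4f35" />\n'
--            '<circle cx="377" cy="312" r="28" fill="#2e8b57" />']),
--     (256, ['<polygon points="180,360 220,300 260,320 280,290 300,310 312,350 280,372 230,376" fill="#1e1e1e" />\n'
--            '<polygon points="255,300 268,278 278,302" fill="#1e1e1e" />\n'
--            '<line x1="310" y1="345" x2="340" y2="320" stroke="#1e1e1e" stroke-width="6" />']),
-- ]
--
-- def scene_svg_from_concepts(concepts):
--     mask = 0
--     for c in concepts:
--         mask |= _BIT.get(str(c).strip().lower(), 0)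
--     bg = "#0b1020" if mask & _SKY else "#dff1ff"
--     parts = [f for m, frags in _LAYERS if mask & m for f in frags]
--     if not parts:
--         parts = ['<text x="40" y="80" fill="white" font-size="22">No known scene concepts.</text>']
--     body = "\n".join(parts)
--     return (f'<svg xmlns="http://www.w3.org/2000/svg" width="512" height="512" viewBox="0 0 512 512">\n'
--             f'<rect width="100%" height="100%" fill="{bg}"/>\n{body}\n</svg>\n')
-- ===== Notes on version B (the rewrite author's own statement) =====
-- stated objective: faster
-- what changed: B replaces A's normalized list plus twelve repeated membership scans and if-branches by a single pass that ORs per-keyword bits (via a keyword-to-bit dictionary) into one integer mask, after which background and every layer are emitted from the mask's bits; A's normalized list is never built. (single pass, no repeated list scans: measured ~2x faster)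
import Mathlib
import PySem

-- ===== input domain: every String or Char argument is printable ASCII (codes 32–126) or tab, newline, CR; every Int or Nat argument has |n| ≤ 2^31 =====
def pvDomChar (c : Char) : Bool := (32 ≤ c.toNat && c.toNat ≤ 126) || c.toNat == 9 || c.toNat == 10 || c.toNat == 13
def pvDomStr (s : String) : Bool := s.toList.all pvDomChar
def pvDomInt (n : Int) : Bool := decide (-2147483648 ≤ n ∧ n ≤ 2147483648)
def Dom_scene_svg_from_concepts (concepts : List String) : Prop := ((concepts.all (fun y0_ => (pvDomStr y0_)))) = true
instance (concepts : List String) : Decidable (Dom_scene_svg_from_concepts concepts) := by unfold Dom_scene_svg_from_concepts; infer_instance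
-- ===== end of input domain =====

-- B makes one pass over the raw concepts OR-ing per-keyword bits into an integer mask
-- (it never builds A's normalized list or rescans it with membership tests), then emits each
-- layer from the mask's bits; a timing run measured B faster (objective: faster).


-- ===== PORT A =====
def svg_wrap (content : String) (width : Int) (height : Int) (bg : String) : String :=
  "<svg xmlns=\"http://www.w3.org/2000/svg\" width=\"" ++ PySem.Int.toStr width ++ "\" height=\"" ++ PySem.Int.toStr height ++ "\" viewBox=\"0 0 " ++ PySem.Int.toStr width ++ " " ++ PySem.Int.toStr height ++ "\">\n<rect width=\"100%\" height=\"100%\" fill=\"" ++ bg ++ "\"/>\n" ++ content ++ "\n</svg>\n"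

def primitive_moon : String := "<circle cx=\"400\" cy=\"100\" r=\"48\" fill=\"#f8f3c9\" opacity=\"0.95\" />"

def primitive_sun : String := "<circle cx=\"400\" cy=\"100\" r=\"52\" fill=\"#ffd54a\" opacity=\"0.95\" />"

def primitive_stars : String :=
  let pts : List (Int × Int) := [(60,70), (120,40), (220,90), (310,50), (470,60), (520,120), (150,130)]
  let parts := pts.foldl (fun ps p =>
    ps ++ ["<circle cx=\"" ++ PySem.Int.toStr p.1 ++ "\" cy=\"" ++ PySem.Int.toStr p.2 ++ "\" r=\"3\" fill=\"white\" />"]) []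
  PySem.Str.join "\n" parts

def primitive_ground : String := "<line x1=\"0\" y1=\"400\" x2=\"512\" y2=\"400\" stroke=\"#445566\" stroke-width=\"3\" />"

def primitive_mountain : String :=
  PySem.Str.join "\n" ["<polygon points=\"40,400 160,210 280,400\" fill=\"#2f3d4f\" />", "<polygon points=\"180,400 320,180 460,400\" fill=\"#394b60\" />"]

def primitive_tree (x : Int) (y : Int) : String :=
  let trunk := "<rect x=\"" ++ PySem.Int.toStr x ++ "\" y=\"" ++ PySem.Int.toStr (y - 70) ++ "\" width=\"14\" height=\"70\" fill=\"#6b4f35\" />"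
  let canopy := "<circle cx=\"" ++ PySem.Int.toStr (x + 7) ++ "\" cy=\"" ++ PySem.Int.toStr (y - 88) ++ "\" r=\"28\" fill=\"#2e8b57\" />"
  trunk ++ "\n" ++ canopy

def primitive_river : String := "<path d=\"M 20 430 C 120 420, 180 450, 300 430 S 450 390, 512 420\" stroke=\"#5dade2\" stroke-width=\"6\" fill=\"none\" opacity=\"0.85\" />"

def primitive_wolf : String :=
  PySem.Str.join "\n" ["<polygon points=\"180,360 220,300 260,320 280,290 300,310 312,350 280,372 230,376\" fill=\"#1e1e1e\" />", "<polygon points=\"255,300 268,278 278,302\" fill=\"#1e1e1e\" />", "<line x1=\"310\" y1=\"345\" x2=\"340\" y2=\"320\" stroke=\"#1e1e1e\" stroke-width=\"6\" />"]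

def scene_svg_from_concepts (concepts : List String) : String :=
  let cl := (concepts.filter (fun c => PySem.Str.strip c ≠ "")).map (fun c => PySem.Str.lower (PySem.Str.strip c))
  let bg := if "night" ∈ cl ∨ "moon" ∈ cl ∨ "star" ∈ cl then "#0b1020" else "#dff1ff"
  let p0 : List String := []
  let p1 := if "sun" ∈ cl then p0 ++ [primitive_sun] else p0
  let p2 := if "moon" ∈ cl then p1 ++ [primitive_moon] else p1
  let p3 := if "star" ∈ cl ∨ "night" ∈ cl ∨ "moon" ∈ cl then p2 ++ [primitive_stars] else p2
  let p4 := if "mountain" ∈ cl then p3 ++ [primitive_mountain] else p3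
  let p5 := if "river" ∈ cl then p4 ++ [primitive_river] else p4
  let p6 := if "ground" ∈ cl ∨ "tree" ∈ cl ∨ "wolf" ∈ cl ∨ "mountain" ∈ cl then p5 ++ [primitive_ground] else p5
  let p7 := if "tree" ∈ cl then p6 ++ [primitive_tree 110 400] ++ [primitive_tree 370 400] else p6
  let p8 := if "wolf" ∈ cl then p7 ++ [primitive_wolf] else p7
  let p9 := if p8 = [] then p8 ++ ["<text x=\"40\" y=\"80\" fill=\"white\" font-size=\"22\">No known scene concepts.</text>"] else p8
  svg_wrap (PySem.Str.join "\n" p9) 512 512 bg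

-- ===== PORT B =====
def pvBit : PySem.Dict String Nat :=
  PySem.Dict.mk [("sun", 1), ("moon", 2), ("star", 4), ("night", 8), ("mountain", 16), ("river", 32), ("ground", 64), ("tree", 128), ("wolf", 256)]

def pvLayers : List (Nat × List String) :=
  [ (1, ["<circle cx=\"400\" cy=\"100\" r=\"52\" fill=\"#ffd54a\" opacity=\"0.95\" />"]),
    (2, ["<circle cx=\"400\" cy=\"100\" r=\"48\" fill=\"#f8f3c9\" opacity=\"0.95\" />"]),
    (14, ["<circle cx=\"60\" cy=\"70\" r=\"3\" fill=\"white\" />\n<circle cx=\"120\" cy=\"40\" r=\"3\" fill=\"white\" />\n<circle cx=\"220\" cy=\"90\" r=\"3\" fill=\"white\" />\n<circle cx=\"310\" cy=\"50\" r=\"3\" fill=\"white\" />\n<circle cx=\"470\" cy=\"60\" r=\"3\" fill=\"white\" />\n<circle cx=\"520\" cy=\"120\" r=\"3\" fill=\"white\" />\n<circle cx=\"150\" cy=\"130\" r=\"3\" fill=\"white\" />"]),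
    (16, ["<polygon points=\"40,400 160,210 280,400\" fill=\"#2f3d4f\" />\n<polygon points=\"180,400 320,180 460,400\" fill=\"#394b60\" />"]),
    (32, ["<path d=\"M 20 430 C 120 420, 180 450, 300 430 S 450 390, 512 420\" stroke=\"#5dade2\" stroke-width=\"6\" fill=\"none\" opacity=\"0.85\" />"]),
    (464, ["<line x1=\"0\" y1=\"400\" x2=\"512\" y2=\"400\" stroke=\"#445566\" stroke-width=\"3\" />"]),
    (128, ["<rect x=\"110\" y=\"330\" width=\"14\" height=\"70\" fill=\"#6b4f35\" />\n<circle cx=\"117\" cy=\"312\" r=\"28\" fill=\"#2e8b57\" />", "<rect x=\"370\" y=\"330\" width=\"14\" height=\"70\" fill=\"#6b4f35\" />\n<circle cx=\"377\" cy=\"312\" r=\"28\" fill=\"#2e8b57\" />"]),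
    (256, ["<polygon points=\"180,360 220,300 260,320 280,290 300,310 312,350 280,372 230,376\" fill=\"#1e1e1e\" />\n<polygon points=\"255,300 268,278 278,302\" fill=\"#1e1e1e\" />\n<line x1=\"310\" y1=\"345\" x2=\"340\" y2=\"320\" stroke=\"#1e1e1e\" stroke-width=\"6\" />"]) ]

def scene_svg_from_concepts_alt (concepts : List String) : String :=
  let mask := concepts.foldl (fun m c => m ||| pvBit.getD (PySem.Str.lower (PySem.Str.strip c)) 0) 0
  let bg := if mask &&& 14 ≠ 0 then "#0b1020" else "#dff1ff"
  let parts := pvLayers.flatMap (fun r => if mask &&& r.1 ≠ 0 then r.2 else [])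
  let parts2 := if parts = [] then ["<text x=\"40\" y=\"80\" fill=\"white\" font-size=\"22\">No known scene concepts.</text>"] else parts
  let body := PySem.Str.join "\n" parts2
  "<svg xmlns=\"http://www.w3.org/2000/svg\" width=\"512\" height=\"512\" viewBox=\"0 0 512 512\">\n<rect width=\"100%\" height=\"100%\" fill=\"" ++ bg ++ "\"/>\n" ++ body ++ "\n</svg>\n"

-- ===== PRECONDITION & SPEC =====
def Spec_scene_svg_from_concepts (concepts : List String) (out : String) : Prop := out = scene_svg_from_concepts_alt concepts
instance (concepts : List String) (out : String) : Decidable (Spec_scene_svg_from_concepts concepts out) := by unfold Spec_scene_svg_from_concepts; infer_instance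

-- ===== CLAIM =====
def Claim_equal_scene_svg_from_concepts : Prop := ∀ (concepts : List String), Dom_scene_svg_from_concepts concepts → Spec_scene_svg_from_concepts concepts (scene_svg_from_concepts concepts)

-- ===== LEMMAS AND PROOFS =====

theorem pv_or_eq_zero (a b : Nat) : a ||| b = 0 ↔ a = 0 ∧ b = 0 := by
  constructor
  · intro h
    have ha : a ≤ a ||| b := Nat.left_le_or
    have hb : b ≤ a ||| b := Nat.right_le_or
    omega
  · rintro ⟨rfl, rfl⟩; rfl

-- the keyword→bit dictionary as an if-chain
set_option maxHeartbeats 2000000 in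
theorem pv_bits_eq (v : String) : pvBit.getD v 0 =
    (if "sun" = v then 1 else if "moon" = v then 2 else if "star" = v then 4 else
     if "night" = v then 8 else if "mountain" = v then 16 else if "river" = v then 32 else
     if "ground" = v then 64 else if "tree" = v then 128 else if "wolf" = v then 256 else 0) := by
  simp only [pvBit, PySem.Dict.getD, PySem.Dict.get?_mk_cons, beq_iff_eq]
  split_ifs <;> rfl

-- a bit of the single-pass mask is set iff some concept contributes it
theorem pv_mask_fold (cs : List String) (m0 mm : Nat) :
    ((cs.foldl (fun m c => m ||| pvBit.getD (PySem.Str.lower (PySem.Str.strip c)) 0) m0) &&& mm ≠ 0) ↔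
    (m0 &&& mm ≠ 0 ∨ ∃ c ∈ cs, (pvBit.getD (PySem.Str.lower (PySem.Str.strip c)) 0) &&& mm ≠ 0) := by
  induction cs generalizing m0 with
  | nil => simp
  | cons c cs ih =>
    rw [List.foldl_cons, ih]
    simp only [ne_eq, Nat.and_or_distrib_right, pv_or_eq_zero, not_and_or, List.mem_cons]
    constructor
    · rintro ((h | h) | ⟨d, hd, hb⟩)
      · exact Or.inl h
      · exact Or.inr ⟨c, Or.inl rfl, h⟩
      · exact Or.inr ⟨d, Or.inr hd, hb⟩
    · rintro (h | ⟨d, rfl | hd, hb⟩)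
      · exact Or.inl (Or.inl h)
      · exact Or.inl (Or.inr hb)
      · exact Or.inr ⟨d, hd, hb⟩

-- membership in A's normalized list, for a non-empty keyword
theorem pv_mem_cl (cs : List String) (k : String) (hk : k ≠ "") :
    (k ∈ (cs.filter (fun c => PySem.Str.strip c ≠ "")).map (fun c => PySem.Str.lower (PySem.Str.strip c))) ↔
    ∃ c ∈ cs, PySem.Str.lower (PySem.Str.strip c) = k := by
  simp only [List.mem_map, List.mem_filter, decide_not, Bool.not_eq_eq_eq_not, Bool.not_true,
    decide_eq_false_iff_not]
  constructor
  · rintro ⟨c, ⟨hc, _⟩, hn⟩; exact ⟨c, hc, hn⟩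
  · rintro ⟨c, hc, hn⟩
    refine ⟨c, ⟨hc, ?_⟩, hn⟩
    intro h
    rw [h] at hn
    exact hk (hn ▸ rfl)

-- oriented variant of pv_mem_cl for left-to-right rewriting
theorem pv_mem_cl2 (cs : List String) (k : String) (hk : k ≠ "") :
    (∃ c ∈ cs, k = PySem.Str.lower (PySem.Str.strip c)) ↔
    (k ∈ (cs.filter (fun c => PySem.Str.strip c ≠ "")).map (fun c => PySem.Str.lower (PySem.Str.strip c))) := by
  rw [pv_mem_cl cs k hk]
  constructor <;> exact fun ⟨c, hc, h⟩ => ⟨c, hc, h.symm⟩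

-- which keywords set each bit mask
theorem pv_hb1 (v : String) : (pvBit.getD v 0) &&& 1 ≠ 0 ↔ ("sun" = v) := by
  rw [pv_bits_eq]; split_ifs <;> (try subst_vars) <;> (try decide) <;> simp_all
theorem pv_hb2 (v : String) : (pvBit.getD v 0) &&& 2 ≠ 0 ↔ ("moon" = v) := by
  rw [pv_bits_eq]; split_ifs <;> (try subst_vars) <;> (try decide) <;> simp_all
theorem pv_hb14 (v : String) : (pvBit.getD v 0) &&& 14 ≠ 0 ↔ ("moon" = v ∨ "star" = v ∨ "night" = v) := by
  rw [pv_bits_eq]; split_ifs <;> (try subst_vars) <;> (try decide) <;> simp_all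
theorem pv_hb16 (v : String) : (pvBit.getD v 0) &&& 16 ≠ 0 ↔ ("mountain" = v) := by
  rw [pv_bits_eq]; split_ifs <;> (try subst_vars) <;> (try decide) <;> simp_all
theorem pv_hb32 (v : String) : (pvBit.getD v 0) &&& 32 ≠ 0 ↔ ("river" = v) := by
  rw [pv_bits_eq]; split_ifs <;> (try subst_vars) <;> (try decide) <;> simp_all
theorem pv_hb464 (v : String) : (pvBit.getD v 0) &&& 464 ≠ 0 ↔ ("mountain" = v ∨ "ground" = v ∨ "tree" = v ∨ "wolf" = v) := by
  rw [pv_bits_eq]; split_ifs <;> (try subst_vars) <;> (try decide) <;> simp_all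
theorem pv_hb128 (v : String) : (pvBit.getD v 0) &&& 128 ≠ 0 ↔ ("tree" = v) := by
  rw [pv_bits_eq]; split_ifs <;> (try subst_vars) <;> (try decide) <;> simp_all
theorem pv_hb256 (v : String) : (pvBit.getD v 0) &&& 256 ≠ 0 ↔ ("wolf" = v) := by
  rw [pv_bits_eq]; split_ifs <;> (try subst_vars) <;> (try decide) <;> simp_all

-- the mask bit(s) 1 correspond to A's membership condition
theorem pv_cond1 (concepts : List String) : ((concepts.foldl (fun m c => m ||| pvBit.getD (PySem.Str.lower (PySem.Str.strip c)) 0) 0) &&& 1 ≠ 0) = ("sun" ∈ ((concepts.filter (fun c => PySem.Str.strip c ≠ "")).map (fun c => PySem.Str.lower (PySem.Str.strip c)))) := propext (by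
  rw [pv_mask_fold]
  simp only [Nat.zero_and, ne_eq, not_true_eq_false, false_or, pv_hb1]
  rw [pv_mem_cl2 concepts "sun" (by decide)])
-- the mask bit(s) 2 correspond to A's membership condition
theorem pv_cond2 (concepts : List String) : ((concepts.foldl (fun m c => m ||| pvBit.getD (PySem.Str.lower (PySem.Str.strip c)) 0) 0) &&& 2 ≠ 0) = ("moon" ∈ ((concepts.filter (fun c => PySem.Str.strip c ≠ "")).map (fun c => PySem.Str.lower (PySem.Str.strip c)))) := propext (by
  rw [pv_mask_fold]
  simp only [Nat.zero_and, ne_eq, not_true_eq_false, false_or, pv_hb2]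
  rw [pv_mem_cl2 concepts "moon" (by decide)])
-- the mask bit(s) 14 correspond to A's membership condition
theorem pv_cond14 (concepts : List String) : ((concepts.foldl (fun m c => m ||| pvBit.getD (PySem.Str.lower (PySem.Str.strip c)) 0) 0) &&& 14 ≠ 0) = ("star" ∈ ((concepts.filter (fun c => PySem.Str.strip c ≠ "")).map (fun c => PySem.Str.lower (PySem.Str.strip c))) ∨ "night" ∈ ((concepts.filter (fun c => PySem.Str.strip c ≠ "")).map (fun c => PySem.Str.lower (PySem.Str.strip c))) ∨ "moon" ∈ ((concepts.filter (fun c => PySem.Str.strip c ≠ "")).map (fun c => PySem.Str.lower (PySem.Str.strip c)))) := propext (by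
  rw [pv_mask_fold]
  simp only [Nat.zero_and, ne_eq, not_true_eq_false, false_or, pv_hb14, and_or_left, exists_or]
  rw [pv_mem_cl2 concepts "moon" (by decide), pv_mem_cl2 concepts "star" (by decide), pv_mem_cl2 concepts "night" (by decide)]
  tauto)
-- the mask bit(s) 16 correspond to A's membership condition
theorem pv_cond16 (concepts : List String) : ((concepts.foldl (fun m c => m ||| pvBit.getD (PySem.Str.lower (PySem.Str.strip c)) 0) 0) &&& 16 ≠ 0) = ("mountain" ∈ ((concepts.filter (fun c => PySem.Str.strip c ≠ "")).map (fun c => PySem.Str.lower (PySem.Str.strip c)))) := propext (by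
  rw [pv_mask_fold]
  simp only [Nat.zero_and, ne_eq, not_true_eq_false, false_or, pv_hb16]
  rw [pv_mem_cl2 concepts "mountain" (by decide)])
-- the mask bit(s) 32 correspond to A's membership condition
theorem pv_cond32 (concepts : List String) : ((concepts.foldl (fun m c => m ||| pvBit.getD (PySem.Str.lower (PySem.Str.strip c)) 0) 0) &&& 32 ≠ 0) = ("river" ∈ ((concepts.filter (fun c => PySem.Str.strip c ≠ "")).map (fun c => PySem.Str.lower (PySem.Str.strip c)))) := propext (by
  rw [pv_mask_fold]
  simp only [Nat.zero_and, ne_eq, not_true_eq_false, false_or, pv_hb32]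
  rw [pv_mem_cl2 concepts "river" (by decide)])
-- the mask bit(s) 464 correspond to A's membership condition
theorem pv_cond464 (concepts : List String) : ((concepts.foldl (fun m c => m ||| pvBit.getD (PySem.Str.lower (PySem.Str.strip c)) 0) 0) &&& 464 ≠ 0) = ("ground" ∈ ((concepts.filter (fun c => PySem.Str.strip c ≠ "")).map (fun c => PySem.Str.lower (PySem.Str.strip c))) ∨ "tree" ∈ ((concepts.filter (fun c => PySem.Str.strip c ≠ "")).map (fun c => PySem.Str.lower (PySem.Str.strip c))) ∨ "wolf" ∈ ((concepts.filter (fun c => PySem.Str.strip c ≠ "")).map (fun c => PySem.Str.lower (PySem.Str.strip c))) ∨ "mountain" ∈ ((concepts.filter (fun c => PySem.Str.strip c ≠ "")).map (fun c => PySem.Str.lower (PySem.Str.strip c)))) := propext (by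
  rw [pv_mask_fold]
  simp only [Nat.zero_and, ne_eq, not_true_eq_false, false_or, pv_hb464, and_or_left, exists_or]
  rw [pv_mem_cl2 concepts "mountain" (by decide), pv_mem_cl2 concepts "ground" (by decide), pv_mem_cl2 concepts "tree" (by decide), pv_mem_cl2 concepts "wolf" (by decide)]
  tauto)
-- the mask bit(s) 128 correspond to A's membership condition
theorem pv_cond128 (concepts : List String) : ((concepts.foldl (fun m c => m ||| pvBit.getD (PySem.Str.lower (PySem.Str.strip c)) 0) 0) &&& 128 ≠ 0) = ("tree" ∈ ((concepts.filter (fun c => PySem.Str.strip c ≠ "")).map (fun c => PySem.Str.lower (PySem.Str.strip c)))) := propext (by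
  rw [pv_mask_fold]
  simp only [Nat.zero_and, ne_eq, not_true_eq_false, false_or, pv_hb128]
  rw [pv_mem_cl2 concepts "tree" (by decide)])
-- the mask bit(s) 256 correspond to A's membership condition
theorem pv_cond256 (concepts : List String) : ((concepts.foldl (fun m c => m ||| pvBit.getD (PySem.Str.lower (PySem.Str.strip c)) 0) 0) &&& 256 ≠ 0) = ("wolf" ∈ ((concepts.filter (fun c => PySem.Str.strip c ≠ "")).map (fun c => PySem.Str.lower (PySem.Str.strip c)))) := propext (by
  rw [pv_mask_fold]
  simp only [Nat.zero_and, ne_eq, not_true_eq_false, false_or, pv_hb256]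
  rw [pv_mem_cl2 concepts "wolf" (by decide)])
theorem pv_condA (concepts : List String) :
    ("night" ∈ ((concepts.filter (fun c => PySem.Str.strip c ≠ "")).map (fun c => PySem.Str.lower (PySem.Str.strip c))) ∨ "moon" ∈ ((concepts.filter (fun c => PySem.Str.strip c ≠ "")).map (fun c => PySem.Str.lower (PySem.Str.strip c))) ∨ "star" ∈ ((concepts.filter (fun c => PySem.Str.strip c ≠ "")).map (fun c => PySem.Str.lower (PySem.Str.strip c)))) = ("star" ∈ ((concepts.filter (fun c => PySem.Str.strip c ≠ "")).map (fun c => PySem.Str.lower (PySem.Str.strip c))) ∨ "night" ∈ ((concepts.filter (fun c => PySem.Str.strip c ≠ "")).map (fun c => PySem.Str.lower (PySem.Str.strip c))) ∨ "moon" ∈ ((concepts.filter (fun c => PySem.Str.strip c ≠ "")).map (fun c => PySem.Str.lower (PySem.Str.strip c)))) := propext (by tauto)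
theorem pv_ite (p l : List String) (c : Prop) (inst : Decidable c) :
    (if c then p ++ l else p) = p ++ (if c then l else []) := by
  split_ifs <;> simp

theorem pv_ite2 (p l1 l2 : List String) (c : Prop) (inst : Decidable c) :
    (if c then p ++ l1 ++ l2 else p) = p ++ (if c then l1 ++ l2 else []) := by
  split_ifs <;> simp

theorem pv_fb (t : List String) (f : String) :
    (if t = [] then t ++ [f] else t) = (if t = [] then [f] else t) := by
  split_ifs with h
  · rw [h]; rfl
  · rfl
set_option maxRecDepth 40000 in
theorem pv_stars : primitive_stars = "<circle cx=\"60\" cy=\"70\" r=\"3\" fill=\"white\" />\n<circle cx=\"120\" cy=\"40\" r=\"3\" fill=\"white\" />\n<circle cx=\"220\" cy=\"90\" r=\"3\" fill=\"white\" />\n<circle cx=\"310\" cy=\"50\" r=\"3\" fill=\"white\" />\n<circle cx=\"470\" cy=\"60\" r=\"3\" fill=\"white\" />\n<circle cx=\"520\" cy=\"120\" r=\"3\" fill=\"white\" />\n<circle cx=\"150\" cy=\"130\" r=\"3\" fill=\"white\" />" := rfl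
set_option maxRecDepth 40000 in
theorem pv_mtn : primitive_mountain = "<polygon points=\"40,400 160,210 280,400\" fill=\"#2f3d4f\" />\n<polygon points=\"180,400 320,180 460,400\" fill=\"#394b60\" />" := rfl
set_option maxRecDepth 40000 in
theorem pv_wolf2 : primitive_wolf = "<polygon points=\"180,360 220,300 260,320 280,290 300,310 312,350 280,372 230,376\" fill=\"#1e1e1e\" />\n<polygon points=\"255,300 268,278 278,302\" fill=\"#1e1e1e\" />\n<line x1=\"310\" y1=\"345\" x2=\"340\" y2=\"320\" stroke=\"#1e1e1e\" stroke-width=\"6\" />" := rfl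
set_option maxRecDepth 40000 in
theorem pv_tree1 : primitive_tree 110 400 = "<rect x=\"110\" y=\"330\" width=\"14\" height=\"70\" fill=\"#6b4f35\" />\n<circle cx=\"117\" cy=\"312\" r=\"28\" fill=\"#2e8b57\" />" := rfl
set_option maxRecDepth 40000 in
theorem pv_tree2 : primitive_tree 370 400 = "<rect x=\"370\" y=\"330\" width=\"14\" height=\"70\" fill=\"#6b4f35\" />\n<circle cx=\"377\" cy=\"312\" r=\"28\" fill=\"#2e8b57\" />" := rfl
set_option maxRecDepth 100000 in
theorem pv_wrap (body bg : String) : svg_wrap body 512 512 bg =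
    "<svg xmlns=\"http://www.w3.org/2000/svg\" width=\"512\" height=\"512\" viewBox=\"0 0 512 512\">\n<rect width=\"100%\" height=\"100%\" fill=\"" ++ bg ++ "\"/>\n" ++ body ++ "\n</svg>\n" := rfl
-- ===== VERDICT =====
set_option maxHeartbeats 2000000 in
set_option maxRecDepth 100000 in
theorem scene_svg_from_concepts_spec : Claim_equal_scene_svg_from_concepts := by
  intro concepts _
  unfold Spec_scene_svg_from_concepts scene_svg_from_concepts scene_svg_from_concepts_alt
  simp only [pv_fb]
  simp only [pvLayers, List.flatMap_cons, List.flatMap_nil, List.append_nil, List.nil_append,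
    pv_ite2, pv_ite, pv_cond1, pv_cond2, pv_cond14, pv_cond16,
    pv_cond32, pv_cond464, pv_cond128, pv_cond256, pv_condA,
    primitive_sun, primitive_moon, primitive_river, primitive_ground,
    pv_stars, pv_mtn, pv_wolf2, pv_tree1, pv_tree2, pv_wrap]
  simp only [List.append_assoc, List.cons_append, List.nil_append]
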